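-- pv_equiv track=rewrite | github.com/Vayuv1/gitbutler-demo | rtstt_salai (1).py | find_best_attachment_point
-- ===== SOURCE A (Python) =====
-- def find_best_attachment_point(existing_words, new_words):
--     """
--     Finds the best index in existing_words to attach the new_words.
--     This helps handle overlaps and corrections.
--     """
--     if not existing_words or not new_words:
--         return len(existing_words)
--
--     # Search for the longest prefix of new_words that exists near the end of existing_words
--     for len_to_test in range(len(new_words), 0, -1):
--         prefix_to_find = new_words[:len_to_test]
--
--         # Search within a reasonable window at the end of the existing words
--         search_window = existing_words[-(len(new_words) + 10):]
--         for i in range(len(search_window)):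
--             if search_window[i:i+len_to_test] == prefix_to_find:
--                 # Return the index in the original `existing_words` list
--                 return len(existing_words) - len(search_window) + i
--
--     return len(existing_words) # If no overlap, append to the end
-- ===== SOURCE B (Python) =====
-- def find_best_attachment_point(existing_words, new_words):
--     """Single left-to-right scan: for each window position compute the common
--     prefix length with new_words directly; keep the earliest position with the
--     maximal overlap length."""
--     n = len(existing_words)
--     m = len(new_words)
--     if n == 0 or m == 0:
--         return n
--     start = max(0, n - (m + 10))
--     best_len = 0
--     best_i = -1
--     for i in range(start, n):
--         l = 0
--         while i + l < n and l < m and existing_words[i + l] == new_words[l]: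
--             l += 1
--         if l > best_len:
--             best_len = l
--             best_i = i
--     return best_i if best_len > 0 else n
-- ===== Notes on version B (the rewrite author's own statement) =====
-- stated objective: faster
-- what changed: A shrinks the candidate prefix length one by one and re-slices/compares the whole window for each length (three nested passes); B makes a single pass over the window computing each position's common-prefix length with new_words once and keeps the earliest position with the maximal length.
import Mathlib
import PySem

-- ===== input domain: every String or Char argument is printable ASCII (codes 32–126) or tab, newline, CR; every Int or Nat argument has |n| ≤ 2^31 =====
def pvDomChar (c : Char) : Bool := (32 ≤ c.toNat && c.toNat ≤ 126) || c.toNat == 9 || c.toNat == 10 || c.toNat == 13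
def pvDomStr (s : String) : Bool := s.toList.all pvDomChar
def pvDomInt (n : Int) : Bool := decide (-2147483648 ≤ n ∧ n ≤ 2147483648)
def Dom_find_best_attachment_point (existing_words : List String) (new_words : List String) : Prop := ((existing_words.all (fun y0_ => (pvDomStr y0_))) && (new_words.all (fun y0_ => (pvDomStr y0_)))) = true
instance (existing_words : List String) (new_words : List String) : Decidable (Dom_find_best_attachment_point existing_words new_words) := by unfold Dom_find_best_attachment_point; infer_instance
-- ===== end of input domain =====

-- B replaces A's cubic shrink-the-prefix search by a single scan of the window that
-- computes each position's common-prefix length once (objective: faster).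


-- ===== PORT A =====
def find_best_attachment_point (existing_words : List String) (new_words : List String) : Int :=
  if existing_words = [] ∨ new_words = [] then (existing_words.length : Int)
  else
    match (PySem.List.pyRange (new_words.length : Int) 0 (-1)).findSome? (fun (len_to_test : Int) =>
      let prefix_to_find := PySem.List.slice new_words none (some len_to_test)
      let search_window := PySem.List.slice existing_words (some (-((new_words.length : Int) + 10))) none
      (List.range search_window.length).findSome? (fun (i : Nat) =>
        if PySem.List.slice search_window (some (i : Int)) (some ((i : Int) + len_to_test)) = prefix_to_find
        then some ((existing_words.length : Int) - (search_window.length : Int) + (i : Int))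
        else none)) with
    | some r => r
    | none => (existing_words.length : Int)

-- ===== PORT B =====
-- the while-loop of Source B walking l over existing[i+l] / new[l] = structural recursion on the two suffixes
def lcpB : List String → List String → Nat
  | a :: as, b :: bs => if a = b then lcpB as bs + 1 else 0
  | _, _ => 0

def find_best_attachment_point_alt (existing_words : List String) (new_words : List String) : Int :=
  let n := existing_words.length
  let m := new_words.length
  if n = 0 ∨ m = 0 then (n : Int)
  else
    -- max(0, n - (m + 10)) is Nat truncated subtraction
    let start := n - (m + 10)
    let best := (List.range' start (n - start)).foldl
      (fun best i =>
        let l := lcpB (existing_words.drop i) new_words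
        if best.1 < l then (l, (i : Int)) else best)
      ((0 : Nat), (-1 : Int))
    if 0 < best.1 then best.2 else (n : Int)

-- ===== PRECONDITION & SPEC =====
def Spec_find_best_attachment_point (existing_words : List String) (new_words : List String) (out : Int) : Prop := out = find_best_attachment_point_alt existing_words new_words
instance (existing_words : List String) (new_words : List String) (out : Int) : Decidable (Spec_find_best_attachment_point existing_words new_words out) := by unfold Spec_find_best_attachment_point; infer_instance

-- ===== CLAIM (what is proved, stated in full; the proofs are below) =====
def Claim_equal_find_best_attachment_point : Prop := ∀ (existing_words : List String) (new_words : List String), Dom_find_best_attachment_point existing_words new_words → Spec_find_best_attachment_point existing_words new_words (find_best_attachment_point existing_words new_words)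

-- ===== LEMMAS AND PROOFS =====

-- ℓ(i) = common-prefix length of window suffix i with new_words; Mx w = its max over i < w
def MxF (W N : List String) (w : Nat) : Nat :=
  ((List.range w).map (fun i => lcpB (W.drop i) N)).foldl max 0

def firstIdxF (W N : List String) (w k : Nat) : Option Nat :=
  (List.range w).find? (fun i => decide (k ≤ lcpB (W.drop i) N))

theorem lcpB_le_right (xs ys : List String) : lcpB xs ys ≤ ys.length := by
  induction xs generalizing ys with
  | nil => simp [lcpB]
  | cons a as ih =>
    cases ys with
    | nil => simp [lcpB]
    | cons b bs =>
      simp only [lcpB, List.length_cons]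
      split_ifs
      · exact Nat.succ_le_succ (ih bs)
      · omega

theorem take_eq_iff_le_lcp (k : Nat) (xs ys : List String) (hk : k ≤ ys.length) :
    (xs.take k = ys.take k) ↔ k ≤ lcpB xs ys := by
  induction k generalizing xs ys with
  | zero => simp
  | succ k ih =>
    cases ys with
    | nil => simp at hk
    | cons b bs =>
      cases xs with
      | nil =>
        simp only [List.take_nil, List.take_succ_cons, lcpB]
        constructor
        · intro h; exact absurd h (by simp)
        · omega
      | cons a as =>
        simp only [List.take_succ_cons, List.cons.injEq, lcpB]
        rw [ih as bs (by simpa using hk)]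
        split_ifs with hab
        · constructor
          · rintro ⟨_, h2⟩; omega
          · intro h; exact ⟨hab, by omega⟩
        · constructor
          · rintro ⟨h1, _⟩; exact absurd h1 hab
          · omega

theorem findSome?_ite {α β : Type} (l : List α) (p : α → Bool) (f : α → β) :
    l.findSome? (fun x => if p x then some (f x) else none) = (l.find? p).map f := by
  induction l with
  | nil => rfl
  | cons a as ih =>
    rw [List.findSome?_cons, List.find?_cons]
    by_cases h : p a
    · simp [h]
    · simp only [Bool.not_eq_true] at h
      simp [h, ih]

theorem foldl_max_mem (l : List Nat) (a : Nat) : l.foldl max a = a ∨ l.foldl max a ∈ l := by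
  induction l generalizing a with
  | nil => simp
  | cons x xs ih =>
    rcases ih (max a x) with h | h
    · rcases max_choice a x with hm | hm
      · left; rw [List.foldl_cons, h, hm]
      · right; rw [List.foldl_cons, h, hm]; exact List.mem_cons_self
    · right; exact List.mem_cons_of_mem _ h

theorem ell_le_MxF (W N : List String) (w i : Nat) (hi : i < w) :
    lcpB (W.drop i) N ≤ MxF W N w :=
  (PySem.List.le_foldl_max _ 0).2 _ (List.mem_map.mpr ⟨i, List.mem_range.mpr hi, rfl⟩)

theorem MxF_le (W N : List String) (w : Nat) : MxF W N w ≤ N.length := by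
  unfold MxF
  rcases foldl_max_mem ((List.range w).map (fun i => lcpB (W.drop i) N)) 0 with h | h
  · omega
  · obtain ⟨i, _, hval⟩ := List.mem_map.mp h
    rw [← hval]; exact lcpB_le_right _ _

theorem MxF_attained (W N : List String) (w : Nat) (h : 1 ≤ MxF W N w) :
    ∃ i, i < w ∧ lcpB (W.drop i) N = MxF W N w := by
  rcases foldl_max_mem ((List.range w).map (fun i => lcpB (W.drop i) N)) 0 with hm | hm
  · unfold MxF at h; omega
  · obtain ⟨i, hi, hval⟩ := List.mem_map.mp hm
    exact ⟨i, List.mem_range.mp hi, hval⟩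

theorem MxF_succ (W N : List String) (w : Nat) :
    MxF W N (w + 1) = max (MxF W N w) (lcpB (W.drop w) N) := by
  unfold MxF
  rw [List.range_succ, List.map_append, List.foldl_append]
  simp

theorem firstIdxF_isSome (W N : List String) (w : Nat) (h : 1 ≤ MxF W N w) :
    ∃ j, firstIdxF W N w (MxF W N w) = some j := by
  obtain ⟨i, hi, hval⟩ := MxF_attained W N w h
  have : ((List.range w).find? (fun i => decide (MxF W N w ≤ lcpB (W.drop i) N))).isSome := by
    rw [List.find?_isSome]
    exact ⟨i, List.mem_range.mpr hi, by simp [hval]⟩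
  exact Option.isSome_iff_exists.mp this

-- the descending outer loop of A returns the first index attaining the maximal overlap
theorem outer_desc (E W N : List String) (w : Nat) :
    ∀ t : Nat, t ≤ N.length → MxF W N w ≤ t →
    (PySem.List.pyRange (t : Int) 0 (-1)).findSome? (fun (len_to_test : Int) =>
      (List.range w).findSome? (fun (i : Nat) =>
        if PySem.List.slice W (some (i : Int)) (some ((i : Int) + len_to_test))
            = PySem.List.slice N none (some len_to_test)
        then some ((E.length : Int) - (w : Int) + (i : Int))
        else none)) =
    (if MxF W N w = 0 then none
     else (firstIdxF W N w (MxF W N w)).map (fun (j : Nat) => (E.length : Int) - (w : Int) + (j : Int))) := by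
  intro t
  induction t with
  | zero =>
    intro _ hM
    rw [PySem.List.pyRange_neg_one_eq_nil (by norm_num)]
    simp only [List.findSome?_nil]
    rw [if_pos (by omega)]
  | succ t ih =>
    intro ht hM
    rw [show ((t + 1 : Nat) : Int) = ((t : Int) + 1) by push_cast; ring,
      PySem.List.pyRange_neg_one_cons (by omega), List.findSome?_cons]
    have hslice1 : ∀ i : Nat, PySem.List.slice W (some (i : Int)) (some ((i : Int) + ((t : Int) + 1)))
        = (W.drop i).take (t + 1) := by
      intro i
      rw [show ((t : Int) + 1) = ((t + 1 : Nat) : Int) by push_cast; ring]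
      exact PySem.List.slice_natCast_add W i (t + 1)
    have hslice2 : PySem.List.slice N none (some ((t : Int) + 1)) = N.take (t + 1) := by
      rw [PySem.List.slice_to N (by omega)]
      norm_num
    have hfun : (fun (i : Nat) =>
        if PySem.List.slice W (some (i : Int)) (some ((i : Int) + ((t : Int) + 1)))
            = PySem.List.slice N none (some ((t : Int) + 1))
        then some ((E.length : Int) - (w : Int) + (i : Int))
        else none) =
        (fun (i : Nat) => if decide (t + 1 ≤ lcpB (W.drop i) N) = true
          then some ((E.length : Int) - (w : Int) + (i : Int)) else none) := by
      funext i
      rw [hslice1 i, hslice2]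
      by_cases h : (W.drop i).take (t + 1) = N.take (t + 1)
      · rw [if_pos h, if_pos (by simp [(take_eq_iff_le_lcp (t+1) _ N ht).mp h])]
      · rw [if_neg h, if_neg (by simpa using fun hc => h ((take_eq_iff_le_lcp (t+1) _ N ht).mpr hc))]
    rw [hfun, findSome?_ite, show ((t : Int) + 1 - 1) = (t : Int) by ring]
    by_cases hcase : MxF W N w = t + 1
    · rw [hcase]
      obtain ⟨j, hj⟩ := firstIdxF_isSome W N w (by omega)
      rw [hcase] at hj
      unfold firstIdxF at hj
      unfold firstIdxF
      rw [hj, if_neg (by omega)]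
      rfl
    · have hnone : (List.range w).find? (fun i => decide (t + 1 ≤ lcpB (W.drop i) N)) = none := by
        rw [List.find?_eq_none]
        intro i hi
        have := ell_le_MxF W N w i (List.mem_range.mp hi)
        simp only [decide_eq_true_eq]
        omega
      rw [hnone]
      simp only [Option.map_none]
      exact ih (by omega) (by omega)

-- the fold of B computes (max overlap, earliest index attaining it; -1 if none)
theorem b_fold_inv (E N : List String) (start : Nat) :
    ∀ w : Nat,
    (List.range' start w).foldl
      (fun best i =>
        let l := lcpB (E.drop i) N
        if best.1 < l then (l, (i : Int)) else best)
      ((0 : Nat), (-1 : Int)) =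
    (MxF (E.drop start) N w,
     if MxF (E.drop start) N w = 0 then (-1 : Int)
     else (firstIdxF (E.drop start) N w (MxF (E.drop start) N w)).elim (-1 : Int)
       (fun (j : Nat) => ((start + j : Nat) : Int))) := by
  intro w
  induction w with
  | zero => simp [MxF]
  | succ w ih =>
    rw [List.range'_concat, List.foldl_append, ih]
    have hdrop : E.drop (start + w) = (E.drop start).drop w := by
      rw [List.drop_drop, Nat.add_comm]
    simp only [List.foldl_cons, List.foldl_nil, Nat.one_mul]
    rw [hdrop]
    set W := E.drop start with hW
    set lw := lcpB (W.drop w) N with hlw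
    rw [MxF_succ]
    by_cases hgt : MxF W N w < lw
    · rw [if_pos hgt, Nat.max_eq_right (by omega)]
      rw [if_neg (by omega)]
      have hfind : firstIdxF W N (w + 1) lw = some w := by
        unfold firstIdxF
        rw [List.range_succ, List.find?_append]
        have h1 : (List.range w).find? (fun i => decide (lw ≤ lcpB (W.drop i) N)) = none := by
          rw [List.find?_eq_none]
          intro i hi
          have := ell_le_MxF W N w i (List.mem_range.mp hi)
          simp only [decide_eq_true_eq]
          omega
        rw [h1]
        simp [← hlw]
      rw [hfind]
      rfl
    · rw [if_neg hgt, Nat.max_eq_left (by omega)]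
      by_cases hz : MxF W N w = 0
      · rw [if_pos hz, if_pos hz]
      · rw [if_neg hz, if_neg hz]
        obtain ⟨j, hj⟩ := firstIdxF_isSome W N w (by omega)
        have hfind : firstIdxF W N (w + 1) (MxF W N w) = some j := by
          unfold firstIdxF at hj ⊢
          rw [List.range_succ, List.find?_append, hj]
          rfl
        rw [hj, hfind]

-- ===== VERDICT (by name: the statement is the Claim_ definition above) =====
theorem find_best_attachment_point_spec : Claim_equal_find_best_attachment_point := by
  intro E N _
  unfold Spec_find_best_attachment_point
  unfold find_best_attachment_point find_best_attachment_point_alt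
  by_cases htriv : E = [] ∨ N = []
  · rw [if_pos htriv, if_pos (by rcases htriv with h | h <;> simp [h])]
  · obtain ⟨hE, hN⟩ := not_or.mp htriv
    rw [if_neg (by tauto), if_neg (by simp [List.length_eq_zero_iff]; tauto)]
    set n := E.length with hn
    set m := N.length with hm
    have hm1 : 1 ≤ m := by
      rw [hm]; cases N with | nil => exact absurd rfl hN | cons _ _ => simp
    set start := n - (m + 10) with hstart
    have hwin : PySem.List.slice E (some (-((m : Int) + 10))) none = E.drop start := by
      rw [show (-((m : Int) + 10)) = -((m + 10 : Nat) : Int) by push_cast; ring]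
      exact PySem.List.slice_from_neg_natCast E (m + 10) (by omega)
    set W := E.drop start with hW
    have hwlen : W.length = n - start := by rw [hW, List.length_drop]
    have hstart_le : start ≤ n := by omega
    set w := n - start with hw
    -- A side
    have hA := outer_desc E W N w m (le_refl m) (by exact MxF_le W N w)
    simp only [hwin] at *
    rw [hwlen, hA, b_fold_inv E N start w, ← hW]
    by_cases hz : MxF W N w = 0
    · rw [if_pos hz, hz]
      simp
    · rw [if_neg hz]
      obtain ⟨j, hj⟩ := firstIdxF_isSome W N w (by omega)
      rw [hj]
      simp only [Option.map_some, Option.elim_some]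
      rw [if_pos (by omega)]
      push_cast
      omega
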